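-- pv_equiv track=rewrite | github.com/rokkc/mcw | main.py | compute_dp
-- ===== SOURCE A (Python) =====
-- def group_cost(c, L, R):
--     """Cost for cow at position c to pick packages from L to R."""
--     if L > R:
--         return 0
--     return (R - L) + min(abs(c - L), abs(c - R))
--
-- def compute_dp(cows, pkgs):
--     """Dynamic program using divide and conquer optimization."""
--     C, P = len(cows), len(pkgs)
--     INF = 10 ** 18
--
--     prev = [0] + [INF] * P
--     curr = [INF] * (P + 1)
--
--     def solve(i, l, r, opt_l, opt_r):
--         if l > r:
--             return
--         mid = (l + r) // 2
--         best_val = INF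
--         best_k = opt_l
--         start = max(0, opt_l)
--         end = min(mid - 1, opt_r)
--         for k in range(start, end + 1):
--             if prev[k] == INF:
--                 continue
--             val = prev[k] + group_cost(cows[i], pkgs[k], pkgs[mid - 1])
--             if val < best_val:
--                 best_val = val
--                 best_k = k
--         curr[mid] = best_val
--         solve(i, l, mid - 1, opt_l, best_k)
--         solve(i, mid + 1, r, best_k, opt_r)
--
--     for i in range(C):
--         curr[0] = 0
--         solve(i, 1, P, 0, P - 1)
--         prev, curr = curr, [INF] * (P + 1)
--     return prev[P]
-- ===== SOURCE B (Python) =====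
-- def group_cost(c, L, R):
--     """Cost for cow at position c to pick packages from L to R."""
--     if L > R:
--         return 0
--     return (R - L) + min(abs(c - L), abs(c - R))
--
-- def compute_dp(cows, pkgs):
--     """Same divide-and-conquer layer computation, but driven by an explicit
--     worklist of (l, r, opt_l, opt_r) frames instead of a recursive closure."""
--     P = len(pkgs)
--     INF = 10 ** 18
--     prev = [0] + [INF] * P
--     for c in cows:
--         curr = [INF] * (P + 1)
--         curr[0] = 0
--         stack = [(1, P, 0, P - 1)]
--         while stack:
--             l, r, lo, hi = stack.pop()
--             if l > r:
--                 continue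
--             mid = (l + r) // 2
--             best_val, best_k = INF, lo
--             for k in range(max(0, lo), min(mid - 1, hi) + 1):
--                 if prev[k] == INF:
--                     continue
--                 val = prev[k] + group_cost(c, pkgs[k], pkgs[mid - 1])
--                 if val < best_val:
--                     best_val, best_k = val, k
--             curr[mid] = best_val
--             stack.append((mid + 1, r, best_k, hi))
--             stack.append((l, mid - 1, lo, best_k))
--         prev = curr
--     return prev[P]
-- ===== Notes on version B (the rewrite author's own statement) =====
-- stated objective: alternative
-- what changed: The recursive divide-and-conquer closure over shared mutable state is replaced by an explicit worklist loop of (l, r, opt_l, opt_r) frames, iterating over cows directly instead of indexing; same asymptotic cost, no recursion depth.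
import Mathlib
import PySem

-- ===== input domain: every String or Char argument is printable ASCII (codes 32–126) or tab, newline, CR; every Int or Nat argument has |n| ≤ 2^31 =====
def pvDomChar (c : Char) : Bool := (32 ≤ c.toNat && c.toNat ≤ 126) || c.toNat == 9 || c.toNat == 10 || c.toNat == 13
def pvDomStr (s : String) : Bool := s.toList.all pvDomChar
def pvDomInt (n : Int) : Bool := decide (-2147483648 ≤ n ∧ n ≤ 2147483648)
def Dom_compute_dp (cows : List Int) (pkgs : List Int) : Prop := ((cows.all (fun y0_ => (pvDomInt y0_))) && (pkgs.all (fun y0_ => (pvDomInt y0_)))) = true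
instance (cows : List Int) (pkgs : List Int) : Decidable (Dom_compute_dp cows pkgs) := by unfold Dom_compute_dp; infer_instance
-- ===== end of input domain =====

-- B replaces A's recursive divide-and-conquer closure by an explicit worklist (stack) loop; same cost (objective: alternative).

-- ===== PORT A =====
def pvINF : Int := 10 ^ 18

def group_cost (c L R : Int) : Int :=
  if L > R then 0 else (R - L) + min |c - L| |c - R|

-- the inner `for k in range(start, end+1)` scan, state = (best_val, best_k)
def pvScan (prev : List Int) (ci : Int) (pkgs : List Int) (mid start stop lo : Int) : Int × Int :=
  (PySem.List.pyRange start stop 1).foldl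
    (fun (st : Int × Int) k =>
      if PySem.List.pyGetD prev k 0 = pvINF then st
      else
        let val := PySem.List.pyGetD prev k 0 +
          group_cost ci (PySem.List.pyGetD pkgs k 0) (PySem.List.pyGetD pkgs (mid - 1) 0)
        if val < st.1 then (val, k) else st)
    (pvINF, lo)

def solveA (prev : List Int) (ci : Int) (pkgs : List Int) (l r opt_l opt_r : Int)
    (curr : List Int) : List Int :=
  if l > r then curr
  else
    let mid := PySem.Int.floordiv (l + r) 2
    let bb := pvScan prev ci pkgs mid (max 0 opt_l) (min (mid - 1) opt_r + 1) opt_l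
    let curr1 := PySem.List.pySetD curr mid bb.1
    solveA prev ci pkgs (mid + 1) r bb.2 opt_r (solveA prev ci pkgs l (mid - 1) opt_l bb.2 curr1)
termination_by (r + 1 - l).toNat
decreasing_by
  · have h := PySem.Int.floordiv_two_mid_bounds (lo := l) (hi := r) (by omega)
    omega
  · have h := PySem.Int.floordiv_two_mid_bounds (lo := l) (hi := r) (by omega)
    omega

def compute_dp (cows : List Int) (pkgs : List Int) : Int :=
  let C : Int := cows.length
  let P : Int := pkgs.length
  let final := (PySem.List.pyRange 0 C 1).foldl
    (fun prev i =>
      solveA prev (PySem.List.pyGetD cows i 0) pkgs 1 P 0 (P - 1)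
        (PySem.List.pySetD (List.replicate (pkgs.length + 1) pvINF) 0 0))
    ([0] ++ List.replicate pkgs.length pvINF)
  PySem.List.pyGetD final P 0

-- ===== PORT B =====
-- worklist loop: each frame is (l, r, opt_l, opt_r); pop, process, push children
def runStack (prev : List Int) (ci : Int) (pkgs : List Int) :
    List (Int × Int × Int × Int) → List Int → List Int
  | [], curr => curr
  | (l, r, lo, hi) :: rest, curr =>
    if l > r then runStack prev ci pkgs rest curr
    else
      let mid := PySem.Int.floordiv (l + r) 2
      let bb := pvScan prev ci pkgs mid (max 0 lo) (min (mid - 1) hi + 1) lo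
      runStack prev ci pkgs ((l, mid - 1, lo, bb.2) :: (mid + 1, r, bb.2, hi) :: rest)
        (PySem.List.pySetD curr mid bb.1)
termination_by stack _ => (stack.map (fun f => 2 * (f.2.1 + 1 - f.1).toNat + 1)).sum
decreasing_by
  · simp only [List.map_cons, List.sum_cons]
    omega
  · simp only [List.map_cons, List.sum_cons]
    have h := PySem.Int.floordiv_two_mid_bounds (lo := l) (hi := r) (by omega)
    omega

def compute_dp_alt (cows : List Int) (pkgs : List Int) : Int :=
  let P : Int := pkgs.length
  let final := cows.foldl
    (fun prev c =>
      runStack prev c pkgs [(1, P, 0, P - 1)]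
        (PySem.List.pySetD (List.replicate (pkgs.length + 1) pvINF) 0 0))
    ([0] ++ List.replicate pkgs.length pvINF)
  PySem.List.pyGetD final P 0

-- ===== PRECONDITION & SPEC =====
def Spec_compute_dp (cows : List Int) (pkgs : List Int) (out : Int) : Prop := out = compute_dp_alt cows pkgs
instance (cows : List Int) (pkgs : List Int) (out : Int) : Decidable (Spec_compute_dp cows pkgs out) := by unfold Spec_compute_dp; infer_instance

-- ===== CLAIM (what is proved, stated in full; the proofs are below) =====
def Claim_equal_compute_dp : Prop := ∀ (cows : List Int) (pkgs : List Int), Dom_compute_dp cows pkgs → Spec_compute_dp cows pkgs (compute_dp cows pkgs)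

-- ===== LEMMAS AND PROOFS =====

-- Popping a frame and running the whole stack equals running the rest of the
-- stack on the state produced by the recursive solver on that frame.
theorem runStack_step (prev : List Int) (ci : Int) (pkgs : List Int) :
    ∀ (n : Nat) (l r lo hi : Int), (r + 1 - l).toNat ≤ n →
      ∀ (rest : List (Int × Int × Int × Int)) (curr : List Int),
        runStack prev ci pkgs ((l, r, lo, hi) :: rest) curr =
        runStack prev ci pkgs rest (solveA prev ci pkgs l r lo hi curr) := by
  intro n
  induction n with
  | zero =>
    intro l r lo hi h rest curr
    have hlr : l > r := by omega
    rw [runStack, solveA]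
    simp [hlr]
  | succ n ih =>
    intro l r lo hi h rest curr
    by_cases hlr : l > r
    · rw [runStack, solveA]; simp [hlr]
    · have hm := PySem.Int.floordiv_two_mid_bounds (lo := l) (hi := r) (by omega)
      rw [runStack, solveA]
      simp only [hlr, if_false]
      rw [ih _ _ _ _ (by omega), ih _ _ _ _ (by omega)]

theorem runStack_single (prev : List Int) (ci : Int) (pkgs : List Int)
    (l r lo hi : Int) (curr : List Int) :
    runStack prev ci pkgs [(l, r, lo, hi)] curr = solveA prev ci pkgs l r lo hi curr := by
  rw [runStack_step prev ci pkgs _ l r lo hi (Nat.le_refl _), runStack]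

theorem compute_dp_eq (cows pkgs : List Int) :
    compute_dp cows pkgs = compute_dp_alt cows pkgs := by
  simp only [compute_dp, compute_dp_alt]
  rw [PySem.List.foldl_pyRange_zero_pyGetD' cows 0
    (fun prev c => solveA prev c pkgs 1 (pkgs.length : Int) 0 ((pkgs.length : Int) - 1)
      (PySem.List.pySetD (List.replicate (pkgs.length + 1) pvINF) 0 0))
    ([0] ++ List.replicate pkgs.length pvINF)]
  congr 1
  apply PySem.List.foldl_congr_mem
  intro acc c _
  rw [runStack_single]

-- ===== VERDICT (by name: the statement is the Claim_ definition above) =====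
theorem compute_dp_spec : Claim_equal_compute_dp := by
  intro cows pkgs _
  unfold Spec_compute_dp
  exact compute_dp_eq cows pkgs
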